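-- pv_equiv track=rewrite | github.com/jiroshimaya/arpakana | src/arpakana/arpabet.py | _apply_standalone_consonant_rules
-- ===== SOURCE A (Python) =====
-- _STANDALONE_CONSONANTS: dict[tuple[str, ...], tuple[str, ...]] = {
--     ("B",): ("ブ",),
--     ("CH",): ("チ",),
--     ("D",): ("ド",),
--     ("DH",): ("ズ",),
--     ("DX",): ("ル",),
--     ("F",): ("フ",),
--     ("G",): ("グ",),
--     ("JH",): ("ジ",),
--     ("K",): ("ク",),
--     ("L",): ("ル",),
--     ("M",): ("ン",),
--     ("N",): ("ン",),
--     ("NG",): ("ン",),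
--     ("NX",): ("ン",),
--     ("P",): ("プ",),
--     ("R",): ("ア",),
--     ("S",): ("ス",),
--     ("SH",): ("シュ",),
--     ("T",): ("トゥ",),
--     ("TH",): ("ス",),
--     ("V",): ("ヴ",),
--     ("Z",): ("ズ",),
--     ("ZH",): ("ジュ",),
--     ("T", "S"): ("ツ",),
-- }
--
-- _STANDALONE_LENGTHS_DESC = sorted({len(k) for k in _STANDALONE_CONSONANTS.keys()}, reverse=True)
--
-- def _apply_standalone_consonant_rules(tokens: list[str]) -> list[str]:
--     """Replace standalone consonant sequences with kana."""
--     out: list[str] = []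
--     i = 0
--     n = len(tokens)
--     while i < n:
--         matched = False
--         for L in _STANDALONE_LENGTHS_DESC:
--             if i + L <= n:
--                 key = tuple(tokens[i:i+L])
--                 kana = _STANDALONE_CONSONANTS.get(key)
--                 if kana is not None:
--                     out.extend(kana)
--                     i += L
--                     matched = True
--                     break
--         if not matched:
--             out.append(tokens[i])
--             i += 1
--     return out
-- ===== SOURCE B (Python) =====
-- _SINGLE_KANA: dict[str, str] = {
--     "B": "ブ", "CH": "チ", "D": "ド", "DH": "ズ", "DX": "ル", "F": "フ",
--     "G": "グ", "JH": "ジ", "K": "ク", "L": "ル", "M": "ン", "N": "ン",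
--     "NG": "ン", "NX": "ン", "P": "プ", "R": "ア", "S": "ス", "SH": "シュ",
--     "T": "トゥ", "TH": "ス", "V": "ヴ", "Z": "ズ", "ZH": "ジュ",
-- }
--
--
-- def _apply_standalone_consonant_rules(tokens: list[str]) -> list[str]:
--     """Replace standalone consonant sequences with kana (right-to-left scan).
--
--     The only multi-token rule is ("T", "S") -> "ツ", and such pairs can never
--     overlap (a pair's "S" cannot also be a pair's "T"), so the greedy
--     left-to-right matching of the original equals a right-to-left scan.
--     """
--     out: list[str] = []
--     j = len(tokens) - 1
--     while j >= 0:
--         if tokens[j] == "S" and j > 0 and tokens[j - 1] == "T":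
--             out.append("ツ")
--             j -= 2
--         else:
--             out.append(_SINGLE_KANA.get(tokens[j], tokens[j]))
--             j -= 1
--     out.reverse()
--     return out
-- ===== Notes on version B (the rewrite author's own statement) =====
-- stated objective: alternative
-- what changed: Replaces the left-to-right while-loop with a longest-first inner scan over tuple-keyed dictionary lookups by a right-to-left scan over a flat string-keyed table: the single pair rule (T,S)->tsu cannot overlap itself, so scanning backwards and appending the output back-to-front (one final reverse) is proved to give the same result.
import Mathlib
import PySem

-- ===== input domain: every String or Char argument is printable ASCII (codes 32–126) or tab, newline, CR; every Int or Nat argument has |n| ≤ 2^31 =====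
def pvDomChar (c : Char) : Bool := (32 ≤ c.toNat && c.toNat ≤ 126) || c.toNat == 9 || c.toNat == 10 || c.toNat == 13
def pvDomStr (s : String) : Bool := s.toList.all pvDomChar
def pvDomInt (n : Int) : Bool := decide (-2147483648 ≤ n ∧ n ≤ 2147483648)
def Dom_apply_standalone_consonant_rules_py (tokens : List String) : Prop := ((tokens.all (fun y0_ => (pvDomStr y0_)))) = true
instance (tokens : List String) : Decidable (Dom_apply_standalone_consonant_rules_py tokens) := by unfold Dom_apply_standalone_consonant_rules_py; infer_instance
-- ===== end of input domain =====

-- B replaces A's left-to-right loop with a longest-first inner scan over a tuple-keyed dict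
-- by a right-to-left scan over a flat string-keyed table (the pair rule cannot overlap itself),
-- building the output back-to-front; objective: alternative.

-- ===== PORT A =====
-- _STANDALONE_CONSONANTS (tuple keys/values become List String)
def pvConsDict : PySem.Dict (List String) (List String) := PySem.Dict.ofList [
  (["B"], ["ブ"]), (["CH"], ["チ"]), (["D"], ["ド"]), (["DH"], ["ズ"]),
  (["DX"], ["ル"]), (["F"], ["フ"]), (["G"], ["グ"]), (["JH"], ["ジ"]),
  (["K"], ["ク"]), (["L"], ["ル"]), (["M"], ["ン"]), (["N"], ["ン"]),
  (["NG"], ["ン"]), (["NX"], ["ン"]), (["P"], ["プ"]), (["R"], ["ア"]),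
  (["S"], ["ス"]), (["SH"], ["シュ"]), (["T"], ["トゥ"]), (["TH"], ["ス"]),
  (["V"], ["ヴ"]), (["Z"], ["ズ"]), (["ZH"], ["ジュ"]), (["T", "S"], ["ツ"])]

-- _STANDALONE_LENGTHS_DESC = sorted({len(k) …}, reverse=True) = [2, 1]
def pvLengthsDesc : List Nat := [2, 1]

-- inner 'for L in _STANDALONE_LENGTHS_DESC' loop: first L with i+L ≤ n and a dict hit
def pvTryLens : List Nat → List String → Option (List String × Nat)
  | [], _ => none
  | L :: ls, rest =>
      if L ≤ rest.length then
        match pvConsDict.get? (rest.take L) with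
        | some kana => some (kana, L)
        | none => pvTryLens ls rest
      else pvTryLens ls rest

-- while i < n loop, as fuel recursion on the suffix tokens[i:] (fuel = n bounds the ≥1 advance of i)
def pvGoA : Nat → List String → List String
  | 0, _ => []
  | _, [] => []
  | fuel + 1, t :: rs =>
      match pvTryLens pvLengthsDesc (t :: rs) with
      | some (kana, L) => kana ++ pvGoA fuel ((t :: rs).drop L)
      | none => t :: pvGoA fuel rs

def apply_standalone_consonant_rules_py (tokens : List String) : List String :=
  pvGoA tokens.length tokens

-- ===== PORT B =====
-- _SINGLE_KANA: flat string-keyed table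
def pvSingleKana : PySem.Dict String String := PySem.Dict.ofList [
  ("B", "ブ"), ("CH", "チ"), ("D", "ド"), ("DH", "ズ"), ("DX", "ル"), ("F", "フ"),
  ("G", "グ"), ("JH", "ジ"), ("K", "ク"), ("L", "ル"), ("M", "ン"), ("N", "ン"),
  ("NG", "ン"), ("NX", "ン"), ("P", "プ"), ("R", "ア"), ("S", "ス"), ("SH", "シュ"),
  ("T", "トゥ"), ("TH", "ス"), ("V", "ヴ"), ("Z", "ズ"), ("ZH", "ジュ")]

-- _SINGLE_KANA.get(tok, tok)
def pvKana (t : String) : String := (pvSingleKana.get? t).getD t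

-- 'while j >= 0' loop: structural recursion over the REVERSED token list,
-- emitting output back-to-front (the caller reverses once at the end)
def pvGoB : List String → List String
  | [] => []
  | [s] => [pvKana s]
  | s :: t :: rest =>
      if s = "S" ∧ t = "T" then "ツ" :: pvGoB rest
      else pvKana s :: pvGoB (t :: rest)

def apply_standalone_consonant_rules_py_alt (tokens : List String) : List String :=
  (pvGoB tokens.reverse).reverse

-- ===== PRECONDITION & SPEC =====
def Spec_apply_standalone_consonant_rules_py (tokens : List String) (out : List String) : Prop := out = apply_standalone_consonant_rules_py_alt tokens
instance (tokens : List String) (out : List String) : Decidable (Spec_apply_standalone_consonant_rules_py tokens out) := by unfold Spec_apply_standalone_consonant_rules_py; infer_instance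

-- ===== CLAIM (what is proved, stated in full; the proofs are below) =====
def Claim_equal_apply_standalone_consonant_rules_py : Prop := ∀ (tokens : List String), Dom_apply_standalone_consonant_rules_py tokens → Spec_apply_standalone_consonant_rules_py tokens (apply_standalone_consonant_rules_py tokens)

-- ===== LEMMAS AND PROOFS =====

-- pvGoA on the empty suffix, any fuel
theorem pvGoA_nil (fuel : Nat) : pvGoA fuel [] = [] := by cases fuel <;> rfl

theorem pvConsDict_mk : pvConsDict = PySem.Dict.mk [
  (["B"], ["ブ"]), (["CH"], ["チ"]), (["D"], ["ド"]), (["DH"], ["ズ"]),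
  (["DX"], ["ル"]), (["F"], ["フ"]), (["G"], ["グ"]), (["JH"], ["ジ"]),
  (["K"], ["ク"]), (["L"], ["ル"]), (["M"], ["ン"]), (["N"], ["ン"]),
  (["NG"], ["ン"]), (["NX"], ["ン"]), (["P"], ["プ"]), (["R"], ["ア"]),
  (["S"], ["ス"]), (["SH"], ["シュ"]), (["T"], ["トゥ"]), (["TH"], ["ス"]),
  (["V"], ["ヴ"]), (["Z"], ["ズ"]), (["ZH"], ["ジュ"]), (["T", "S"], ["ツ"])] := by decide

theorem pvSingleKana_mk : pvSingleKana = PySem.Dict.mk [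
  ("B", "ブ"), ("CH", "チ"), ("D", "ド"), ("DH", "ズ"), ("DX", "ル"), ("F", "フ"),
  ("G", "グ"), ("JH", "ジ"), ("K", "ク"), ("L", "ル"), ("M", "ン"), ("N", "ン"),
  ("NG", "ン"), ("NX", "ン"), ("P", "プ"), ("R", "ア"), ("S", "ス"), ("SH", "シュ"),
  ("T", "トゥ"), ("TH", "ス"), ("V", "ヴ"), ("Z", "ズ"), ("ZH", "ジュ")] := by decide

-- single-token lookup in A's tuple-keyed dict = lookup in B's flat table
theorem pvSingle (t : String) :
    pvConsDict.get? [t] = (pvSingleKana.get? t).map (fun x => [x]) := by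
  rw [pvConsDict_mk, pvSingleKana_mk]
  simp only [PySem.Dict.get?_mk_cons, List.cons_beq_cons, List.beq_nil_eq, List.isEmpty_cons,
    BEq.rfl, Bool.and_true, Bool.and_false,
    apply_ite (Option.map (fun x : String => [x])), Option.map_some]
  simp [PySem.Dict.get?]

theorem pvGetTS : pvConsDict.get? ["T", "S"] = some ["ツ"] := by decide

-- the only length-2 key is ["T","S"]
theorem pvGet2 (t s : String) (h : ¬ (t = "T" ∧ s = "S")) :
    pvConsDict.get? [t, s] = none := by
  rw [pvConsDict_mk]
  simp only [PySem.Dict.get?_mk_cons]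
  simp [PySem.Dict.get?]
  intro h1 h2; subst h1; subst h2; exact absurd ⟨rfl, rfl⟩ h

theorem pvTryLens_pair (t s : String) (rs : List String) (h : t = "T" ∧ s = "S") :
    pvTryLens pvLengthsDesc (t :: s :: rs) = some (["ツ"], 2) := by
  obtain ⟨rfl, rfl⟩ := h
  simp [pvTryLens, pvLengthsDesc, pvGetTS]

theorem pvTryLens_nopair (t s : String) (rs : List String) (h : ¬ (t = "T" ∧ s = "S")) :
    pvTryLens pvLengthsDesc (t :: s :: rs) =
      match pvConsDict.get? [t] with
      | some kana => some (kana, 1)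
      | none => none := by
  simp [pvTryLens, pvLengthsDesc, pvGet2 t s h]

theorem pvTryLens_single (t : String) :
    pvTryLens pvLengthsDesc [t] =
      match pvConsDict.get? [t] with
      | some kana => some (kana, 1)
      | none => none := by
  simp [pvTryLens, pvLengthsDesc]

-- a trailing ["S","T"] of the reversed list always pairs and pairs never reach across it
theorem pvGoB_pairSuffix : ∀ ys : List String,
    pvGoB (ys ++ ["S", "T"]) = pvGoB ys ++ ["ツ"] := by
  intro ys
  induction ys using pvGoB.induct with
  | case1 => simp [pvGoB]
  | case2 s => simp [pvGoB]
  | case3 s t rest h ih =>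
      obtain ⟨rfl, rfl⟩ := h
      simp [pvGoB, ih]
  | case4 s t rest h ih =>
      simp only [List.cons_append, pvGoB, if_neg h]
      rw [show (t :: (rest ++ ["S", "T"]) : List String) = (t :: rest) ++ ["S", "T"] from rfl, ih]

-- appending one more (older) token that does not pair with the last of ys
theorem pvGoB_snoc : ∀ (ys : List String) (t : String),
    ¬ (ys.getLast? = some "S" ∧ t = "T") →
    pvGoB (ys ++ [t]) = pvGoB ys ++ [pvKana t] := by
  intro ys
  induction ys using pvGoB.induct with
  | case1 => intro t h; simp [pvGoB]
  | case2 s =>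
      intro t h
      have hns : ¬ (s = "S" ∧ t = "T") := by
        rintro ⟨rfl, rfl⟩; exact h ⟨by simp, rfl⟩
      simp [pvGoB, hns]
  | case3 s u rest h ih =>
      intro t ht
      obtain ⟨rfl, rfl⟩ := h
      cases rest with
      | nil => simp [pvGoB]
      | cons a as =>
          have ht' : ¬ ((a :: as).getLast? = some "S" ∧ t = "T") := by
            rintro ⟨h1, rfl⟩
            exact ht ⟨by simpa [List.getLast?_cons_cons] using h1, rfl⟩
          simp [pvGoB]
          rw [show (a :: (as ++ [t]) : List String) = (a :: as) ++ [t] from rfl, ih t ht']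
  | case4 s u rest h ih =>
      intro t ht
      have ht' : ¬ ((u :: rest).getLast? = some "S" ∧ t = "T") := by
        rintro ⟨h1, rfl⟩
        exact ht ⟨by simpa [List.getLast?_cons_cons] using h1, rfl⟩
      simp only [List.cons_append, pvGoB, if_neg h]
      rw [show (u :: (rest ++ [t]) : List String) = (u :: rest) ++ [t] from rfl, ih t ht']

theorem pvGoA_eq (fuel : Nat) : ∀ rest : List String, rest.length ≤ fuel →
    pvGoA fuel rest = (pvGoB rest.reverse).reverse := by
  induction fuel with
  | zero =>
      intro rest h
      have : rest = [] := List.eq_nil_of_length_eq_zero (Nat.le_zero.mp h)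
      subst this; rfl
  | succ fuel ih =>
      intro rest h
      match rest with
      | [] => rfl
      | [t] =>
          rw [pvGoA, pvTryLens_single, pvSingle]
          cases hg : pvSingleKana.get? t <;>
            simp [hg, pvGoB, pvKana, pvGoA_nil]
      | t :: s :: rs =>
          by_cases hp : t = "T" ∧ s = "S"
          · rw [pvGoA, pvTryLens_pair t s rs hp]
            obtain ⟨rfl, rfl⟩ := hp
            have hlen : rs.length ≤ fuel := by simp at h; omega
            simp [ih rs hlen, pvGoB_pairSuffix]
          · have hlen : (s :: rs).length ≤ fuel := by simp at h ⊢; omega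
            have hcond : ¬ (((s :: rs).reverse).getLast? = some "S" ∧ t = "T") := by
              rw [List.getLast?_reverse]
              rintro ⟨h1, rfl⟩
              exact hp ⟨rfl, by simpa using h1⟩
            have hB : (pvGoB ((t :: s :: rs).reverse)).reverse
                = pvKana t :: (pvGoB ((s :: rs).reverse)).reverse := by
              rw [show (t :: s :: rs : List String).reverse = (s :: rs).reverse ++ [t] by simp,
                pvGoB_snoc _ t hcond]
              simp
            rw [pvGoA, pvTryLens_nopair t s rs hp, pvSingle, hB]
            cases hg : pvSingleKana.get? t <;>
              simp [hg, pvKana, ih (s :: rs) hlen]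

-- ===== VERDICT (by name: the statement is the Claim_ definition above) =====
theorem apply_standalone_consonant_rules_py_spec : Claim_equal_apply_standalone_consonant_rules_py := by
  intro tokens _
  unfold Spec_apply_standalone_consonant_rules_py apply_standalone_consonant_rules_py
    apply_standalone_consonant_rules_py_alt
  exact pvGoA_eq tokens.length tokens le_rfl
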